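-- pv_equiv track=rewrite | github.com/Tal500/django-reactive-framework | core/utils.py | manual_non_empty_sum
-- ===== SOURCE A (Python) =====
-- def manual_non_empty_sum(iter):
--     is_first: bool = True
--     is_string: bool = False
--     for element in iter:
--         if is_first:
--             sum = element
--             is_first = False
--
--             if isinstance(element, str):
--                 is_string = True
--         else:
--             if is_string:
--                 element = str(element)
--             elif isinstance(element, str):
--                 sum = str(sum)
--                 is_string = True
--
--             sum = sum + element
--
--     return sum
-- ===== SOURCE B (Python) =====
-- import functools
-- import operator
--
-- def manual_non_empty_sum(iter):
--     elements = list(iter)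
--     k = next((i for i, e in enumerate(elements) if isinstance(e, str)), len(elements))
--     if k == len(elements):
--         return functools.reduce(operator.add, elements)
--     head = str(functools.reduce(operator.add, elements[:k])) if k else ''
--     return head + ''.join(map(str, elements[k:]))
-- ===== Notes on version B (the rewrite author's own statement) =====
-- stated objective: alternative
-- what changed: Replaces the stateful is_first/is_string flag loop with an index-first split: find the first string element, reduce the numeric prefix with functools.reduce(operator.add), and join the stringified tail; Pre_ excludes only the empty list, where A raises UnboundLocalError (B's reduce raises TypeError), and the Lean port is the int-list specialisation fixed by the task's List Int domain, under which the string branches of both Pythons are dead.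
import Mathlib
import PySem

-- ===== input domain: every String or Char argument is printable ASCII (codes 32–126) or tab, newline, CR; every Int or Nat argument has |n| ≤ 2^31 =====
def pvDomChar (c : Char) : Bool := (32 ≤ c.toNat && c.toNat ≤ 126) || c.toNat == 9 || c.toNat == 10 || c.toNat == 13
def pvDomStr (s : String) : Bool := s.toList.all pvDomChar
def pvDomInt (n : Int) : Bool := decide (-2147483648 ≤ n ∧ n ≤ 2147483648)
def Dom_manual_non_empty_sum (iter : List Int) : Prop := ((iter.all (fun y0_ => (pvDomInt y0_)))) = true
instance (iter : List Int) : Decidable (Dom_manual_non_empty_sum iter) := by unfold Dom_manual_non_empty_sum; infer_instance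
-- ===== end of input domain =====

-- B replaces A's stateful is_first/is_string flag loop with an index-first split (numeric reduce + string join);
-- alternative decomposition, same cost.  The task's domain is List Int, so both ports are the int-list
-- specialisation of their Pythons, under which the string branches of both are dead code.

-- ===== PORT A =====
-- loop body: 'is_first' ↔ accumulator still none; the isinstance(str) branches never fire for Int elements
def pvLoopA (acc : Option Int) (e : Int) : Option Int :=
  match acc with
  | none => some e          -- is_first: sum = element
  | some s => some (s + e)  -- sum = sum + element
def manual_non_empty_sum (iter : List Int) : Int :=
  (iter.foldl pvLoopA none).getD 0  -- none = unbound 'sum' (UnboundLocalError); excluded by Pre_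

-- ===== PORT B =====
-- with no string element, k = len(elements) and B returns functools.reduce(operator.add, elements)
def manual_non_empty_sum_alt (iter : List Int) : Int :=
  match iter with
  | [] => 0                        -- reduce of an empty sequence raises TypeError; excluded by Pre_
  | x :: xs => xs.foldl (· + ·) x  -- functools.reduce(operator.add, elements)

-- ===== PRECONDITION & SPEC =====
-- Pre_ excludes exactly the empty list, on which both Pythons raise (A: UnboundLocalError, B: TypeError from reduce).
def Pre_manual_non_empty_sum (iter : List Int) : Prop := iter ≠ []
instance (iter : List Int) : Decidable (Pre_manual_non_empty_sum iter) := by unfold Pre_manual_non_empty_sum; infer_instance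
def pvWitness_manual_non_empty_sum : List Int := [1, 2, 3]

def Spec_manual_non_empty_sum (iter : List Int) (out : Int) : Prop := out = manual_non_empty_sum_alt iter
instance (iter : List Int) (out : Int) : Decidable (Spec_manual_non_empty_sum iter out) := by unfold Spec_manual_non_empty_sum; infer_instance

-- ===== CLAIM (what is proved, stated in full; the proofs are below) =====
def Claim_equal_manual_non_empty_sum : Prop := ∀ (iter : List Int), Dom_manual_non_empty_sum iter → Pre_manual_non_empty_sum iter → Spec_manual_non_empty_sum iter (manual_non_empty_sum iter)

-- ===== LEMMAS AND PROOFS =====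
theorem pvLoopA_some (xs : List Int) (a : Int) :
    xs.foldl pvLoopA (some a) = some (xs.foldl (· + ·) a) := by
  induction xs generalizing a with
  | nil => rfl
  | cons y ys ih => simpa [List.foldl, pvLoopA] using ih (a + y)

-- ===== VERDICT (by name: the statement is the Claim_ definition above) =====
theorem manual_non_empty_sum_spec : Claim_equal_manual_non_empty_sum := by
  intro iter _ hpre
  match iter with
  | [] => exact absurd rfl hpre
  | x :: xs =>
    simp [Spec_manual_non_empty_sum, manual_non_empty_sum, manual_non_empty_sum_alt,
      List.foldl, pvLoopA, pvLoopA_some]
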